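-- pv_equiv track=rewrite | github.com/AEG2024/Numerology-Python-Project | numerology.py | calculate_soul_urge_number
-- ===== SOURCE A (Python) =====
-- def sum_of_digits(num):
--     total = 0
--     for digit in str(num):
--         if digit.isdigit():  # Ensure we're only summing digits
--             total += int(digit)
--     return total
--
-- def reduce_to_single_digit(num):
--     while num > 9:
--         num = sum_of_digits(num)
--     return num
--
-- letter_to_number = {
--     "A": 1,
--     "B": 2,
--     "C": 3,
--     "D": 4,
--     "E": 5,
--     "F": 6,
--     "G": 7,
--     "H": 8,
--     "I": 9,
--     "J": 1,
--     "K": 2,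
--     "L": 3,
--     "M": 4,
--     "N": 5,
--     "O": 6,
--     "P": 7,
--     "Q": 8,
--     "R": 9,
--     "S": 1,
--     "T": 2,
--     "U": 3,
--     "V": 4,
--     "W": 5,
--     "X": 6,
--     "Y": 7,
--     "Z": 8,
-- }
--
-- vowels = {"A", "E", "I", "O", "U"}
--
-- def calculate_soul_urge_number(full_name):
--     full_name = full_name.upper()
--     total = 0
--     vowel_found = False  # Track if any vowel is found
--
--     for letter in full_name:
--         if letter in vowels:  # Sum only vowels
--             total += letter_to_number[letter]
--             vowel_found = True
--
--     if not vowel_found: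
--         return (
--             0,
--             "The name you provided contains no vowels, which is why the Soul Urge Number is 0. "
--             "The Soul Urge Number reflects your innermost desires and motivations, and since it is "
--             "derived from vowels, a lack of vowels leads to a 0 result. You may want to reflect on "
--             "how this unique characteristic of your name might influence your personal journey.",
--         )
--
--     return reduce_to_single_digit(total), ""
-- ===== SOURCE B (Python) =====
-- VOWEL_VALUES = {"A": 1, "E": 5, "I": 9, "O": 6, "U": 3}
--
-- NO_VOWEL_MSG = (
--     "The name you provided contains no vowels, which is why the Soul Urge Number is 0. "
--     "The Soul Urge Number reflects your innermost desires and motivations, and since it is "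
--     "derived from vowels, a lack of vowels leads to a 0 result. You may want to reflect on "
--     "how this unique characteristic of your name might influence your personal journey."
-- )
--
-- def calculate_soul_urge_number(full_name):
--     name = full_name.upper()
--     # count each of the five vowels once, instead of scanning letter by letter
--     total = sum(name.count(v) * value for v, value in VOWEL_VALUES.items())
--     if total == 0:
--         # every vowel value is positive, so total == 0 iff no vowel occurred
--         return (0, NO_VOWEL_MSG)
--     # digital root in closed form: total >= 1, so this equals the repeated digit-sum loop
--     return (1 + (total - 1) % 9, "")
-- ===== Notes on version B (the rewrite author's own statement) =====
-- stated objective: faster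
-- what changed: Instead of A's per-letter loop with a vowel_found flag followed by the repeated digit-summing while-loop, B iterates over the five vowels, multiplying each vowel's str.count in the uppercased name by its value, and reduces the total with the closed-form digital root 1 + (total - 1) % 9 guarded by total == 0 (equivalent to no vowel found since every vowel value is positive). (str.count runs in C, removing the per-letter Python loop).
import Mathlib
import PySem

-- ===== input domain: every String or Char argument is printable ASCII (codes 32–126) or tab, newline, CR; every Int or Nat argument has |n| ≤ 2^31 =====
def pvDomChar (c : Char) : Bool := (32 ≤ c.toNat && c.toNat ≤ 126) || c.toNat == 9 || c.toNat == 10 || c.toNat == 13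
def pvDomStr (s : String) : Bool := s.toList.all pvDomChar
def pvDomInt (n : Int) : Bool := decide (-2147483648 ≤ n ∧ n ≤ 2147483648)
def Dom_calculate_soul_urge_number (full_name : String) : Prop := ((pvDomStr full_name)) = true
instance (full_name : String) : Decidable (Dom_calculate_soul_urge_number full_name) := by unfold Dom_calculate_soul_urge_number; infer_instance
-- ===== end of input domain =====

-- B iterates over the five vowels with count-times-value instead of A's per-letter loop with a
-- flag, and replaces A's repeated digit-summing loop by the closed-form digital root (objective: faster, C-level str.count; measured).


-- ===== PORT A =====

-- def sum_of_digits(num): loop over str(num), adding int(digit) for digit characters.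
-- (int(digit) is ported as (ofChars? [digit]).getD 0; the default is unreachable since the
--  branch is guarded by digit.isdigit(), on which int() always succeeds.)
def sum_of_digits (num : Int) : Int :=
  (PySem.Int.toChars num).foldl
    (fun total digit =>
      if PySem.Chars.isdigit digit then total + (PySem.Int.ofChars? [digit]).getD 0
      else total) 0

-- The next five lemmas exist only to justify the termination of reduce_to_single_digit
-- (decreasing_by cites sum_of_digits_lt_toNat, which needs them).
lemma charFoldSum (cs : List Char) (a : Int) :
    cs.foldl
      (fun total digit =>
        if PySem.Chars.isdigit digit then total + (PySem.Int.ofChars? [digit]).getD 0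
        else total) a
      = a + (cs.map (fun c =>
          if PySem.Chars.isdigit c then (PySem.Int.ofChars? [c]).getD 0 else 0)).sum := by
  induction cs generalizing a with
  | nil => simp
  | cons c cs ih =>
    simp only [List.foldl_cons, List.map_cons, List.sum_cons, ih]
    by_cases h : PySem.Chars.isdigit c = true <;> simp [h, add_assoc]

lemma digitChar_val (d : Nat) (hd : d < 10) :
    (if PySem.Chars.isdigit d.digitChar then (PySem.Int.ofChars? [d.digitChar]).getD 0 else 0)
      = (d : Int) := by
  interval_cases d <;> decide

lemma toDigitsCore_eq (f : Nat) : ∀ (n : Nat) (l : List Char), 0 < n → n < f →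
    Nat.toDigitsCore 10 f n l = ((Nat.digits 10 n).map Nat.digitChar).reverse ++ l := by
  induction f with
  | zero => intro n l hn hf; omega
  | succ f ih =>
    intro n l hn hf
    rw [Nat.digits_def' (by norm_num : 1 < 10) hn]
    simp only [Nat.toDigitsCore]
    by_cases h : n / 10 = 0
    · simp [h]
    · rw [if_neg h, ih (n / 10) _ (by omega) (by omega)]
      simp

lemma sum_of_digits_natCast (n : Nat) :
    sum_of_digits (n : Int) = ((Nat.digits 10 n).sum : Int) := by
  unfold sum_of_digits
  have ht : PySem.Int.toChars (n : Int) = Nat.toDigits 10 n := by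
    simp [PySem.Int.toChars]
  rw [ht, Nat.toDigits]
  rcases Nat.eq_zero_or_pos n with h | h
  · subst h; decide
  · rw [toDigitsCore_eq (n + 1) n [] h (by omega), charFoldSum]
    simp only [List.append_nil, List.map_reverse, List.sum_reverse, List.map_map,
      Function.comp_def]
    rw [List.map_congr_left (fun d hd =>
      digitChar_val d (Nat.digits_lt_base (by norm_num) hd))]
    simp [Nat.cast_list_sum]

lemma digits_sum_lt (n : Nat) (h : 10 ≤ n) : (Nat.digits 10 n).sum < n := by
  rw [Nat.digits_def' (by norm_num : 1 < 10) (by omega)]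
  have := Nat.digit_sum_le 10 (n / 10)
  simp only [List.sum_cons]
  omega

lemma sum_of_digits_lt_toNat (num : Int) (h : 9 < num) :
    (sum_of_digits num).toNat < num.toNat := by
  have he : sum_of_digits num = ((Nat.digits 10 num.toNat).sum : Int) := by
    conv_lhs => rw [show num = ((num.toNat : Nat) : Int) from by omega]
    exact sum_of_digits_natCast _
  have := digits_sum_lt num.toNat (by omega)
  omega

-- def reduce_to_single_digit(num): while num > 9: num = sum_of_digits(num)
def reduce_to_single_digit (num : Int) : Int :=
  if h : 9 < num then reduce_to_single_digit (sum_of_digits num) else num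
termination_by num.toNat
decreasing_by exact sum_of_digits_lt_toNat num h

-- module constants of A (the dict, the vowel set, the no-vowel message)
def letter_to_number : PySem.Dict Char Int := PySem.Dict.ofList
  [('A', 1), ('B', 2), ('C', 3), ('D', 4), ('E', 5), ('F', 6), ('G', 7), ('H', 8), ('I', 9),
   ('J', 1), ('K', 2), ('L', 3), ('M', 4), ('N', 5), ('O', 6), ('P', 7), ('Q', 8), ('R', 9),
   ('S', 1), ('T', 2), ('U', 3), ('V', 4), ('W', 5), ('X', 6), ('Y', 7), ('Z', 8)]

def vowels : PySem.Set Char := PySem.Set.ofList ['A', 'E', 'I', 'O', 'U']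

def no_vowel_msg : String :=
  "The name you provided contains no vowels, which is why the Soul Urge Number is 0. " ++
  "The Soul Urge Number reflects your innermost desires and motivations, and since it is " ++
  "derived from vowels, a lack of vowels leads to a 0 result. You may want to reflect on " ++
  "how this unique characteristic of your name might influence your personal journey."

-- letter_to_number[letter] is ported as Dict.getD … 0; the default is unreachable since the
-- lookup is guarded by letter ∈ vowels and every vowel is a key of the dict.
-- one iteration of A's for-loop over (total, vowel_found)
def soul_step (st : Int × Bool) (letter : Char) : Int × Bool :=
  if PySem.Set.contains vowels letter then
    (st.1 + PySem.Dict.getD letter_to_number letter 0, true)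
  else st

def calculate_soul_urge_number (full_name : String) : Int × String :=
  let name := PySem.Chars.upper full_name.toList
  let st := name.foldl soul_step (0, false)
  if st.2 = false then (0, no_vowel_msg)
  else (reduce_to_single_digit st.1, "")

-- ===== PORT B =====
-- B's VOWEL_VALUES dict (items in insertion order, as B's generator iterates over them)
def vowel_values : List (Char × Int) := [('A', 1), ('E', 5), ('I', 9), ('O', 6), ('U', 3)]

-- sum(name.count(v) * value for v, value in VOWEL_VALUES.items())
def calculate_soul_urge_number_alt (full_name : String) : Int × String :=
  let name := PySem.Chars.upper full_name.toList
  let total := vowel_values.foldl (fun acc p => acc + (name.count p.1 : Int) * p.2) 0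
  if total = 0 then (0, no_vowel_msg)
  else (1 + PySem.Int.mod (total - 1) 9, "")

-- ===== PRECONDITION & SPEC =====
def Spec_calculate_soul_urge_number (full_name : String) (out : Int × String) : Prop := out = calculate_soul_urge_number_alt full_name
instance (full_name : String) (out : Int × String) : Decidable (Spec_calculate_soul_urge_number full_name out) := by unfold Spec_calculate_soul_urge_number; infer_instance

-- ===== CLAIM (what is proved, stated in full; the proofs are below) =====
def Claim_equal_calculate_soul_urge_number : Prop := ∀ (full_name : String), Dom_calculate_soul_urge_number full_name → Spec_calculate_soul_urge_number full_name (calculate_soul_urge_number full_name)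

-- ===== LEMMAS AND PROOFS =====

-- B's total, as a function of the character list
def countTotal (cs : List Char) : Int :=
  vowel_values.foldl (fun acc p => acc + (cs.count p.1 : Int) * p.2) 0

lemma countTotal_expand (cs : List Char) :
    countTotal cs = (cs.count 'A' : Int) * 1 + (cs.count 'E' : Int) * 5
      + (cs.count 'I' : Int) * 9 + (cs.count 'O' : Int) * 6 + (cs.count 'U' : Int) * 3 := by
  simp [countTotal, vowel_values]

lemma countTotal_cons (c : Char) (cs : List Char) :
    countTotal (c :: cs)
      = (if PySem.Set.contains vowels c then PySem.Dict.getD letter_to_number c 0 else 0)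
        + countTotal cs := by
  by_cases h : c ∈ vowels
  · have hc : c = 'A' ∨ c = 'E' ∨ c = 'I' ∨ c = 'O' ∨ c = 'U' := by
      simp [vowels, PySem.Set.ofList, PySem.Set.add, PySem.Set.empty] at h
      tauto
    rcases hc with h' | h' | h' | h' | h'
    · subst h'
      rw [show (if PySem.Set.contains vowels 'A' then PySem.Dict.getD letter_to_number 'A' 0
          else 0) = (1 : Int) from by decide]
      simp [countTotal_expand, List.count_cons]; push_cast; ring
    · subst h'
      rw [show (if PySem.Set.contains vowels 'E' then PySem.Dict.getD letter_to_number 'E' 0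
          else 0) = (5 : Int) from by decide]
      simp [countTotal_expand, List.count_cons]; push_cast; ring
    · subst h'
      rw [show (if PySem.Set.contains vowels 'I' then PySem.Dict.getD letter_to_number 'I' 0
          else 0) = (9 : Int) from by decide]
      simp [countTotal_expand, List.count_cons]; push_cast; ring
    · subst h'
      rw [show (if PySem.Set.contains vowels 'O' then PySem.Dict.getD letter_to_number 'O' 0
          else 0) = (6 : Int) from by decide]
      simp [countTotal_expand, List.count_cons]; push_cast; ring
    · subst h'
      rw [show (if PySem.Set.contains vowels 'U' then PySem.Dict.getD letter_to_number 'U' 0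
          else 0) = (3 : Int) from by decide]
      simp [countTotal_expand, List.count_cons]; push_cast; ring
  · have hA : ¬ (c = 'A') := fun he => h (by rw [he]; decide)
    have hE : ¬ (c = 'E') := fun he => h (by rw [he]; decide)
    have hI : ¬ (c = 'I') := fun he => h (by rw [he]; decide)
    have hO : ¬ (c = 'O') := fun he => h (by rw [he]; decide)
    have hU : ¬ (c = 'U') := fun he => h (by rw [he]; decide)
    simp [countTotal_expand, List.count_cons, h, hA, hE, hI, hO, hU]

-- A's vowel loop computes B's count-sum, and A's flag is 'some vowel occurs'
lemma loopA (cs : List Char) (t : Int) (b : Bool) :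
    cs.foldl soul_step (t, b)
      = (t + countTotal cs, b || cs.any (fun c => PySem.Set.contains vowels c)) := by
  induction cs generalizing t b with
  | nil => simp [countTotal, vowel_values]
  | cons c cs ih =>
    rw [List.foldl_cons, List.any_cons, countTotal_cons]
    by_cases h : c ∈ vowels
    · rw [show soul_step (t, b) c = (t + PySem.Dict.getD letter_to_number c 0, true) from
        by simp [soul_step, h], ih]
      simp [h, add_assoc]
    · rw [show soul_step (t, b) c = (t, b) from by simp [soul_step, h], ih]
      simp [h]

lemma countTotal_pos (cs : List Char) (h : ∃ x ∈ cs, x ∈ vowels) : 1 ≤ countTotal cs := by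
  obtain ⟨x, hx, hxv⟩ := h
  have hc : x = 'A' ∨ x = 'E' ∨ x = 'I' ∨ x = 'O' ∨ x = 'U' := by
    simp [vowels, PySem.Set.ofList, PySem.Set.add, PySem.Set.empty] at hxv
    tauto
  rw [countTotal_expand]
  rcases hc with h' | h' | h' | h' | h' <;> subst h' <;>
    [have := List.count_pos_iff.mpr hx; have := List.count_pos_iff.mpr hx;
     have := List.count_pos_iff.mpr hx; have := List.count_pos_iff.mpr hx;
     have := List.count_pos_iff.mpr hx] <;> omega

lemma digits_sum_pos (n : Nat) (hn : 1 ≤ n) : 1 ≤ (Nat.digits 10 n).sum := by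
  induction n using Nat.strong_induction_on with
  | _ n ih =>
    rw [Nat.digits_def' (by norm_num : 1 < 10) (by omega)]
    simp only [List.sum_cons]
    rcases Nat.eq_zero_or_pos (n / 10) with h | h
    · have hd : Nat.digits 10 (n / 10) = [] := by rw [h]; simp
      rw [hd]; simp; omega
    · have := ih (n / 10) (Nat.div_lt_self (by omega) (by norm_num)) h
      omega

-- the while loop computes the digital root in closed form (for num ≥ 1)
lemma reduce_eq_digital_root : ∀ (k : Nat) (num : Int), num.toNat ≤ k → 1 ≤ num →
    reduce_to_single_digit num = 1 + (num - 1) % 9 := by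
  intro k
  induction k with
  | zero => intro num hk h1; omega
  | succ k ih =>
    intro num hk h1
    rw [reduce_to_single_digit]
    by_cases h : 9 < num
    · rw [dif_pos h]
      have he : sum_of_digits num = ((Nat.digits 10 num.toNat).sum : Int) := by
        conv_lhs => rw [show num = ((num.toNat : Nat) : Int) from by omega]
        exact sum_of_digits_natCast _
      have hlt := digits_sum_lt num.toNat (by omega)
      have hpos := digits_sum_pos num.toNat (by omega)
      rw [ih (sum_of_digits num) (by omega) (by omega)]
      have hmod := Nat.modEq_digits_sum 9 10 (by norm_num) num.toNat
      unfold Nat.ModEq at hmod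
      omega
    · rw [dif_neg h]; omega

-- ===== VERDICT (by name: the statement is the Claim_ definition above) =====
theorem calculate_soul_urge_number_spec : Claim_equal_calculate_soul_urge_number := by
  intro s _hdom
  unfold Spec_calculate_soul_urge_number
  simp only [calculate_soul_urge_number, calculate_soul_urge_number_alt, loopA,
    Bool.false_or, zero_add]
  set cs := PySem.Chars.upper s.toList with hcs
  rw [show vowel_values.foldl (fun acc p => acc + (cs.count p.1 : Int) * p.2) 0
        = countTotal cs from rfl]
  cases hany : cs.any (fun c => PySem.Set.contains vowels c) with
  | false =>
    have hno : ∀ c ∈ cs, c ∉ vowels := by simpa using List.any_eq_false.mp hany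
    have hz : countTotal cs = 0 := by
      rw [countTotal_expand]
      have hA : cs.count 'A' = 0 := List.count_eq_zero.mpr (fun hx => hno _ hx (by decide))
      have hE : cs.count 'E' = 0 := List.count_eq_zero.mpr (fun hx => hno _ hx (by decide))
      have hI : cs.count 'I' = 0 := List.count_eq_zero.mpr (fun hx => hno _ hx (by decide))
      have hO : cs.count 'O' = 0 := List.count_eq_zero.mpr (fun hx => hno _ hx (by decide))
      have hU : cs.count 'U' = 0 := List.count_eq_zero.mpr (fun hx => hno _ hx (by decide))
      rw [hA, hE, hI, hO, hU]; ring
    rw [hz]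
    simp
  | true =>
    have hpos := countTotal_pos cs (by simpa using hany)
    rw [if_neg (by simp), if_neg (by omega : ¬ countTotal cs = 0),
      reduce_eq_digital_root (countTotal cs).toNat _ le_rfl hpos,
      PySem.Int.mod_eq_emod_of_pos (by norm_num)]
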